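-- pv_equiv track=rewrite | github.com/kyrie2333/deepmd-kit | deepmd/tools/profiler_visualization_topk.py | group_by_op_type
-- ===== SOURCE A (Python) =====
-- def get_op_type_from_name(name):
--     return name.split('/')[-1].split('_')[0]
--
-- def group_by_op_type(time_list):
--     time_dict = dict()
--     for name, agv, min_time, max_time in time_list:
--         op_type = get_op_type_from_name(name)
--         if op_type in time_dict:
--             time_dict[op_type] = time_dict[op_type] + agv
--         else:
--             time_dict[op_type] = agv
--     return time_dict
-- ===== SOURCE B (Python) =====
-- def get_op_type_from_name(name):
--     return name.split('/')[-1].split('_')[0]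
--
-- def group_by_op_type(time_list):
--     keyed = [(get_op_type_from_name(name), agv) for name, agv, _min, _max in time_list]
--     keys = list(dict.fromkeys(k for k, _ in keyed))
--     return {k: sum(a for kk, a in keyed if kk == k) for k in keys}
-- ===== Notes on version B (the rewrite author's own statement) =====
-- stated objective: alternative
-- what changed: B replaces A's incremental dict-accumulation loop with a two-pass grouping: it first builds (op_type, agv) pairs, extracts the first-occurrence-ordered distinct keys, then computes each key's total by summing a filtered pass over the pairs.
import Mathlib
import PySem

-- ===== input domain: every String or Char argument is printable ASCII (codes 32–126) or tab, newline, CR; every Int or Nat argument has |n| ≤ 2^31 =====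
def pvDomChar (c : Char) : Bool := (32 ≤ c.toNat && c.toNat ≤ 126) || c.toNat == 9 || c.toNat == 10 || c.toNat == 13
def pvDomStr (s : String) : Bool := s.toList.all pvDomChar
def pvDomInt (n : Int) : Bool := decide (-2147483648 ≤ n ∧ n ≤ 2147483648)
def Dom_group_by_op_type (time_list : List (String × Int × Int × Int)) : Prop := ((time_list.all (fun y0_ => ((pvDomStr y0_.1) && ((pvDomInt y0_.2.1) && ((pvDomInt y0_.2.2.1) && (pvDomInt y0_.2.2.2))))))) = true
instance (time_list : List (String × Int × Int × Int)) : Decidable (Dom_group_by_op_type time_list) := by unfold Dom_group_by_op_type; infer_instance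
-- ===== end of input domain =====

-- B replaces A's incremental dict-accumulation loop with a two-pass grouping
-- (distinct keys in first-occurrence order, then one summed filter pass per key);
-- objective: alternative decomposition, not speed.

-- ===== PORT A =====
-- shared helper: get_op_type_from_name (used unchanged by both A and B)
-- name.split('/')[-1].split('_')[0]; split results are never empty, so the .getD defaults are unreachable
def get_op_type_from_name (name : String) : String :=
  let last := (PySem.List.pyGet? ((PySem.Str.split? name "/").getD []) (-1)).getD ""
  (PySem.List.pyGet? ((PySem.Str.split? last "_").getD []) 0).getD ""

def pyStepA (time_dict : PySem.Dict String Int) (t : String × Int × Int × Int) : PySem.Dict String Int :=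
  match t with
  | (name, agv, _min_time, _max_time) =>
    let op_type := get_op_type_from_name name
    if time_dict.contains op_type then
      -- time_dict[op_type] + agv: the contains guard makes getD exact here
      time_dict.insert op_type (time_dict.getD op_type 0 + agv)
    else
      time_dict.insert op_type agv

def group_by_op_type (time_list : List (String × Int × Int × Int)) : List (String × Int) :=
  (time_list.foldl pyStepA PySem.Dict.empty).items

-- ===== PORT B =====
def group_by_op_type_alt (time_list : List (String × Int × Int × Int)) : List (String × Int) :=
  let keyed := time_list.map (fun t => (get_op_type_from_name t.1, t.2.1))
  let keys := PySem.List.dedup (keyed.map (·.1))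
  keys.map (fun k => (k, ((keyed.filter (fun p => p.1 == k)).map (·.2)).sum))

-- ===== PRECONDITION & SPEC =====
def Spec_group_by_op_type (time_list : List (String × Int × Int × Int)) (out : List (String × Int)) : Prop := out = group_by_op_type_alt time_list
instance (time_list : List (String × Int × Int × Int)) (out : List (String × Int)) : Decidable (Spec_group_by_op_type time_list out) := by unfold Spec_group_by_op_type; infer_instance

-- ===== CLAIM (what is proved, stated in full; the proofs are below) =====
def Claim_equal_group_by_op_type : Prop := ∀ (time_list : List (String × Int × Int × Int)), Dom_group_by_op_type time_list → Spec_group_by_op_type time_list (group_by_op_type time_list)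

-- ===== LEMMAS AND PROOFS =====

-- A's loop step (on the keyed pair) is a single insert of the accumulated value
theorem step_eq_insert (d : PySem.Dict String Int) (k : String) (a : Int) :
    (if d.contains k then d.insert k (d.getD k 0 + a) else d.insert k a)
      = d.insert k (d.getD k 0 + a) := by
  split
  · rfl
  · rename_i h
    rw [PySem.Dict.getD_of_not_contains d 0 (by simpa using h), Int.zero_add]

theorem getD_foldl_ins (l : List (String × Int)) (d : PySem.Dict String Int) (c : String) :
    (l.foldl (fun d p => d.insert p.1 (d.getD p.1 0 + p.2)) d).getD c 0
      = d.getD c 0 + ((l.filter (fun p => p.1 == c)).map (·.2)).sum := by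
  induction l generalizing d with
  | nil => simp
  | cons p l ih =>
    simp only [List.foldl_cons, ih, List.filter_cons]
    by_cases hc : p.1 = c
    · simp [hc, PySem.Dict.getD_insert_self, Int.add_assoc]
    · have h2 := PySem.Dict.getD_insert_of_ne d (d.getD p.1 0 + p.2) 0 (Ne.symm hc)
      simp [hc, h2]

theorem keys_foldl_ins (l : List (String × Int)) :
    (l.foldl (fun d p => d.insert p.1 (d.getD p.1 0 + p.2)) PySem.Dict.empty).keys
      = PySem.List.dedup (l.map (·.1)) := by
  rw [PySem.Dict.keys_foldl_insert_key l (·.1) (fun d p => d.getD p.1 0 + p.2)]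
  simp [PySem.Dict.keys_empty, PySem.Set.update_nil_left]

theorem nodup_keys_foldl_ins (l : List (String × Int)) :
    (l.foldl (fun d p => d.insert p.1 (d.getD p.1 0 + p.2)) PySem.Dict.empty).keys.Nodup :=
  PySem.Dict.nodup_keys_foldl_insert_key l (·.1) _ _ PySem.Dict.nodup_keys_empty

theorem A_fold_eq (tl : List (String × Int × Int × Int)) :
    tl.foldl pyStepA PySem.Dict.empty
      = (tl.map (fun t => (get_op_type_from_name t.1, t.2.1))).foldl
          (fun d p => d.insert p.1 (d.getD p.1 0 + p.2)) PySem.Dict.empty := by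
  rw [List.foldl_map]
  apply PySem.List.foldl_congr_mem
  intro d t _
  rcases t with ⟨name, agv, m, M⟩
  simpa [pyStepA] using step_eq_insert d (get_op_type_from_name name) agv

-- ===== VERDICT (by name: the statement is the Claim_ definition above) =====
theorem group_by_op_type_spec : Claim_equal_group_by_op_type := by
  intro tl _
  unfold Spec_group_by_op_type group_by_op_type group_by_op_type_alt
  rw [A_fold_eq tl,
      PySem.Dict.items_eq_map_keys _ (nodup_keys_foldl_ins _) 0,
      keys_foldl_ins]
  apply List.map_congr_left
  intro k _
  rw [getD_foldl_ins]
  simp
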